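-- pv_equiv track=rewrite | github.com/navyaxkumar/Python-Assignment---II | gradebook.py | grade_allocator
-- ===== SOURCE A (Python) =====
-- def grade_allocator(marks_data):
--     #Assign grades based on marks.
--     results = {}
--     for student, score in marks_data.items():
--         if score >= 90:
--             results[student] = 'A'
--         elif score >= 80:
--             results[student] = 'B'
--         elif score >= 70:
--             results[student] = 'C'
--         elif score >= 60:
--             results[student] = 'D'
--         else:
--             results[student] = 'F'
--     return results
-- ===== SOURCE B (Python) =====
-- def grade_allocator(marks_data):
--     # Table-driven: count how many thresholds the score meets; that count
--     # indexes directly into the grade table (0 thresholds met -> 'F', 4 -> 'A').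
--     thresholds = (60, 70, 80, 90)
--     grades = ('F', 'D', 'C', 'B', 'A')
--     return {student: grades[sum(score >= t for t in thresholds)]
--             for student, score in marks_data.items()}
-- ===== Notes on version B (the rewrite author's own statement) =====
-- stated objective: idiomatic
-- what changed: Replaces the five-way if/elif cascade with a threshold table: the grade is looked up in a parallel table indexed by the number of thresholds the score meets, built in a single dict comprehension.
import Mathlib
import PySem

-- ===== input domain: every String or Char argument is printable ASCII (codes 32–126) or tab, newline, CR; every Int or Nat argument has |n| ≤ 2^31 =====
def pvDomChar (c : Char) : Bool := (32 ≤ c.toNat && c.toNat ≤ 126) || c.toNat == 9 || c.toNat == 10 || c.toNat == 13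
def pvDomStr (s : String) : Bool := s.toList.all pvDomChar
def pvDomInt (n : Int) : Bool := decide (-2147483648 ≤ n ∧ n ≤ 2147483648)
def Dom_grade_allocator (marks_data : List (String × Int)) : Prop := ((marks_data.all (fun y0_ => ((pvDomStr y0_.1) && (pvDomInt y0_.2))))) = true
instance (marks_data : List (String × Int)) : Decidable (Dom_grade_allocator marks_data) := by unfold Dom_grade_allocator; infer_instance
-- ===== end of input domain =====

-- B replaces A's five-way if/elif cascade by a threshold table indexed by the
-- number of thresholds met (objective: more idiomatic table-driven lookup).

-- ===== PORT A =====
def grade_allocator (marks_data : List (String × Int)) : List (String × String) :=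
  (marks_data.foldl (fun (results : PySem.Dict String String) p =>
      if p.2 ≥ 90 then results.insert p.1 "A"
      else if p.2 ≥ 80 then results.insert p.1 "B"
      else if p.2 ≥ 70 then results.insert p.1 "C"
      else if p.2 ≥ 60 then results.insert p.1 "D"
      else results.insert p.1 "F") PySem.Dict.empty).items

-- ===== PORT B =====
-- grades[...] : the index is a count over 4 thresholds, hence always in [0,4] and
-- in range of the 5-element table, so pyGetD's default is never used (exact here).
def grade_allocator_alt (marks_data : List (String × Int)) : List (String × String) :=
  let thresholds : List Int := [60, 70, 80, 90]
  let grades : List String := ["F", "D", "C", "B", "A"]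
  (marks_data.foldl (fun (d : PySem.Dict String String) p =>
      d.insert p.1 (PySem.List.pyGetD grades
        (thresholds.foldl (fun acc t => acc + (if p.2 ≥ t then 1 else 0)) 0) "F"))
    PySem.Dict.empty).items

-- ===== PRECONDITION & SPEC =====
def Spec_grade_allocator (marks_data : List (String × Int)) (out : List (String × String)) : Prop := out = grade_allocator_alt marks_data
instance (marks_data : List (String × Int)) (out : List (String × String)) : Decidable (Spec_grade_allocator marks_data out) := by unfold Spec_grade_allocator; infer_instance

-- ===== CLAIM (what is proved, stated in full; the proofs are below) =====
def Claim_equal_grade_allocator : Prop := ∀ (marks_data : List (String × Int)), Dom_grade_allocator marks_data → Spec_grade_allocator marks_data (grade_allocator marks_data)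

-- ===== LEMMAS AND PROOFS =====

-- the table lookup equals the if/elif cascade, for every score
theorem grade_val_eq (s : Int) :
    PySem.List.pyGetD ["F", "D", "C", "B", "A"]
      ([(60:Int), 70, 80, 90].foldl (fun acc t => acc + (if s ≥ t then 1 else 0)) 0) "F"
    = (if s ≥ 90 then "A" else if s ≥ 80 then "B" else if s ≥ 70 then "C"
       else if s ≥ 60 then "D" else "F") := by
  simp only [List.foldl]
  split_ifs with h90 h80 h70 h60 <;>
    simp_all [PySem.List.pyGetD] <;> omega

-- ===== VERDICT (by name: the statement is the Claim_ definition above) =====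
theorem grade_allocator_spec : Claim_equal_grade_allocator := by
  intro marks_data _
  show grade_allocator marks_data = grade_allocator_alt marks_data
  unfold grade_allocator grade_allocator_alt
  congr 2
  funext d p
  rw [grade_val_eq p.2]
  split_ifs <;> rfl
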